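-- pv_equiv track=rewrite | github.com/RafelAmer04/Project-Euler | Python/P051.py | Repetitions
-- ===== SOURCE A (Python) =====
-- def Repetitions(n):
--     r = {}
--     s = str(n)
--     for i in range(len(s)):
--         k = int(s[i])
--         try:
--             r[k]
--         except:
--             r[k] = []
--         r[k].append(i)
--     r1 = {}
--     for k in r.keys():
--         if len(r[k]) > 1:
--             r1[k] = r[k]
--     return r1
-- ===== SOURCE B (Python) =====
-- def Repetitions(n):
--     s = str(n)
--     counts = {}
--     for c in s:
--         counts[c] = counts.get(c, 0) + 1
--     r = {}
--     for i, c in enumerate(s):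
--         if counts[c] > 1:
--             r.setdefault(int(c), []).append(i)
--     return r
-- ===== Notes on version B (the rewrite author's own statement) =====
-- stated objective: alternative
-- what changed: B first builds a character frequency table in one pass, then a single enumerate pass appends a position only when its digit is repeated (setdefault), instead of A's building the full digit-to-positions map and then filtering it by value length in a second dict pass.
-- crash fix: On every negative n, A raises ValueError (int('-') on the sign character); B never converts the unrepeated sign character and returns the repeated-digit position map of str(n). — e.g. on Repetitions(-11): A raises ValueError, B returns [(1, [1, 2])]
import Mathlib
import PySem

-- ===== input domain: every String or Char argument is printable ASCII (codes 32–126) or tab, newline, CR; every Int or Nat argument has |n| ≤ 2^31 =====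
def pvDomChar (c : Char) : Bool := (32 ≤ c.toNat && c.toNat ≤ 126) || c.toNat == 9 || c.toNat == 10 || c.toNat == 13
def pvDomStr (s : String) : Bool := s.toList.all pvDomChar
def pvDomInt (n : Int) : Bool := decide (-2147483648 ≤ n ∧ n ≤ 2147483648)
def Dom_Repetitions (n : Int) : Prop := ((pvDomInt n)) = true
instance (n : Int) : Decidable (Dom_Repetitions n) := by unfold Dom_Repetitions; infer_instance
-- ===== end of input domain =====

-- B builds a char-frequency table first and inserts positions of repeated digits in one filtered
-- pass, instead of A's full digit→positions map filtered afterwards; same cost, different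
-- decomposition.


-- ===== PORT A =====
-- int(ch) for a one-character string; PySem.Int.ofChars? is exact ('none' = ValueError, only
-- reachable outside Pre_, where Python raises).
def pvKey (c : Char) : Int := (PySem.Int.ofChars? [c]).getD 0

def Repetitions (n : Int) : List (Int × List Int) :=
  let s := PySem.Int.toChars n                       -- s = str(n) as its character list
  let r : PySem.Dict Int (List Int) :=
    (PySem.List.pyRange 0 (PySem.List.len s)).foldl  -- for i in range(len(s))
      (fun r i =>
        -- k = int(s[i]); try r[k] / except: r[k] = [] ; r[k].append(i)
        -- (create-if-absent then append in place = Dict.modify with default [])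
        r.modify (pvKey (PySem.List.pyGetD s i ' ')) [] (fun v => v ++ [i]))
      PySem.Dict.empty
  (r.keys.foldl                                      -- for k in r.keys(): if len(r[k]) > 1: r1[k] = r[k]
      (fun r1 k => if (r.getD k []).length > 1 then r1.insert k (r.getD k []) else r1)
      (PySem.Dict.empty : PySem.Dict Int (List Int))).items

-- ===== PORT B =====
def Repetitions_alt (n : Int) : List (Int × List Int) :=
  let s := PySem.Int.toChars n                       -- s = str(n) as its character list
  let counts : PySem.Dict Char Int :=                -- counts[c] = counts.get(c, 0) + 1
    s.foldl (fun d c => d.insert c (d.getD c 0 + 1)) PySem.Dict.empty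
  let r : PySem.Dict Int (List Int) :=
    s.zipIdx.foldl                                   -- for i, c in enumerate(s)
      (fun r p =>
        if counts.getD p.1 0 > 1 then
          -- r.setdefault(int(c), []).append(i): insert [] if absent, then append in
          -- place — exactly Dict.modify with default []
          r.modify (pvKey p.1) [] (fun v => v ++ [(p.2 : Int)])
        else r)
      PySem.Dict.empty
  r.items

-- ===== PRECONDITION & SPEC =====
-- Pre_ excludes exactly the negative n, on which A raises ValueError (int('-')).
def Pre_Repetitions (n : Int) : Prop := 0 ≤ n
instance (n : Int) : Decidable (Pre_Repetitions n) := by unfold Pre_Repetitions; infer_instance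
def pvWitness_Repetitions : Int := 112233

-- On every negative n, A raises ValueError (int('-') on the sign character); B never converts the
-- unrepeated sign character and returns the repeated-digit position map of str(n).
def Raises_Repetitions (n : Int) : Prop := n < 0
instance (n : Int) : Decidable (Raises_Repetitions n) := by unfold Raises_Repetitions; infer_instance
def pvRaiseWitness_Repetitions : Int := -11
def pvRaiseWitnessOut_Repetitions : List (Int × List Int) := [(1, [1, 2])]

def Spec_Repetitions (n : Int) (out : List (Int × List Int)) : Prop := out = Repetitions_alt n
instance (n : Int) (out : List (Int × List Int)) : Decidable (Spec_Repetitions n out) := by unfold Spec_Repetitions; infer_instance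

-- ===== CLAIM (what is proved, stated in full; the proofs are below) =====
def Claim_equal_Repetitions : Prop := ∀ (n : Int), Dom_Repetitions n → Pre_Repetitions n → Spec_Repetitions n (Repetitions n)
def Claim_raises_Repetitions : Prop := (∀ (n : Int), Dom_Repetitions n → Raises_Repetitions n → ¬ Pre_Repetitions n) ∧ (Dom_Repetitions (pvRaiseWitness_Repetitions) ∧ Raises_Repetitions (pvRaiseWitness_Repetitions) ∧ Repetitions_alt (pvRaiseWitness_Repetitions) = pvRaiseWitnessOut_Repetitions)

-- ===== LEMMAS AND PROOFS =====

def pvDIG : List Char := ['0','1','2','3','4','5','6','7','8','9']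
def pvToKV (p : Char × Nat) : Int × Int := (pvKey p.1, (p.2 : Int))
def pvDictOf (l : List (Int × Int)) : PySem.Dict Int (List Int) :=
  l.foldl (fun d p => d.modify p.1 [] (fun v => v ++ [p.2])) PySem.Dict.empty

-- A's index loop over range(len(s)) is the fold over the enumerated list.
lemma pv_range_enum {β : Type} (s : List Char) (d : Char) (f : β → Int → Char → β) :
    ∀ (k : Nat) (init : β),
      ((PySem.List.pyRange (k : Int) (PySem.List.len s)).foldl
          (fun acc i => f acc i (PySem.List.pyGetD s i d)) init)
      = ((s.drop k).zipIdx k).foldl (fun acc p => f acc ((p.2 : Nat) : Int) p.1) init := by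
  have H : ∀ (m k : Nat) (init : β), s.length - k ≤ m →
      ((PySem.List.pyRange (k : Int) (PySem.List.len s)).foldl
          (fun acc i => f acc i (PySem.List.pyGetD s i d)) init)
      = ((s.drop k).zipIdx k).foldl (fun acc p => f acc ((p.2 : Nat) : Int) p.1) init := by
    intro m
    induction m with
    | zero =>
      intro k init hm
      have hk : s.length ≤ k := by omega
      rw [List.drop_eq_nil_of_le hk]
      rw [PySem.List.pyRange_one_eq_nil (by simp [PySem.List.len]; exact_mod_cast hk)]
      simp
    | succ m ih =>
      intro k init hm
      by_cases hk : k < s.length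
      · rw [PySem.List.pyRange_one_cons (by simp [PySem.List.len]; exact_mod_cast hk)]
        rw [List.drop_eq_getElem_cons hk, List.zipIdx_cons]
        simp only [List.foldl_cons]
        rw [PySem.List.pyGetD_natCast]
        have : ((k : Int) + 1) = ((k + 1 : Nat) : Int) := by push_cast; ring
        rw [this, ih (k + 1) _ (by omega)]
        simp [List.getD_eq_getElem?_getD, hk]
      · have hk' : s.length ≤ k := by omega
        rw [List.drop_eq_nil_of_le hk']
        rw [PySem.List.pyRange_one_eq_nil (by simp [PySem.List.len]; exact_mod_cast hk')]
        simp
  intro k init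
  exact H (s.length - k) k init le_rfl

lemma pv_keys_dictOf (l : List (Int × Int)) :
    (pvDictOf l).keys = PySem.Set.ofList (l.map (fun p => p.1)) := by
  unfold pvDictOf
  rw [PySem.Dict.keys_foldl_modify_key l (fun p => p.1) [] (fun _ p v => v ++ [p.2])]
  rfl

lemma pv_nodup_keys_dictOf (l : List (Int × Int)) : (pvDictOf l).keys.Nodup := by
  unfold pvDictOf
  exact PySem.Dict.nodup_keys_foldl_modify_key l (fun p => p.1) [] (fun _ p v => v ++ [p.2]) _ List.nodup_nil

lemma pv_getD_dictOf (l : List (Int × Int)) (k : Int) :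
    (pvDictOf l).getD k [] = (l.filter (fun p => p.1 == k)).map (fun p => p.2) := by
  unfold pvDictOf
  rw [PySem.Dict.getD_foldl_modify_append]
  simp

-- items of the accumulation dict: first-occurrence keys, each with its list of values.
lemma pv_items_dictOf (l : List (Int × Int)) :
    (pvDictOf l).items
      = (PySem.Set.ofList (l.map (fun p => p.1))).map
          (fun k => (k, (l.filter (fun p => p.1 == k)).map (fun p => p.2))) := by
  rw [PySem.Dict.items_eq_map_keys _ (pv_nodup_keys_dictOf l) []]
  rw [pv_keys_dictOf]
  exact List.map_congr_left (fun k _ => by rw [pv_getD_dictOf])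

-- A's second loop (insert the keys whose list has length > 1 into a fresh dict) is a filter.
lemma pv_filter_loop (r : PySem.Dict Int (List Int)) (hnd : r.keys.Nodup) :
    (r.keys.foldl
        (fun r1 k => if (r.getD k []).length > 1 then r1.insert k (r.getD k []) else r1)
        (PySem.Dict.empty : PySem.Dict Int (List Int))).items
      = (r.keys.filter (fun k => decide ((r.getD k []).length > 1))).map
          (fun k => (k, r.getD k [])) := by
  have h1 : (r.keys.foldl
        (fun r1 k => if (r.getD k []).length > 1 then r1.insert k (r.getD k []) else r1)
        (PySem.Dict.empty : PySem.Dict Int (List Int)))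
      = (r.keys.filter (fun k => decide ((r.getD k []).length > 1))).foldl
        (fun r1 k => r1.insert k (r.getD k [])) PySem.Dict.empty := by
    rw [List.foldl_filter]
    simp
  rw [h1]
  rw [PySem.Dict.items_foldl_insert_fresh _ (fun k => k) (fun k => r.getD k []) _
      (fun a _ => rfl) (by simpa using hnd.filter _)]
  rfl

-- ordered dedup (set construction) commutes with filter
lemma pv_ofList_filter {α : Type} [BEq α] [LawfulBEq α] (p : α → Bool) (l : List α) :
    PySem.Set.ofList (l.filter p) = (PySem.Set.ofList l).filter p := by
  have H : ∀ (l acc : List α),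
      (List.foldl PySem.Set.add acc l).filter p
        = List.foldl PySem.Set.add (acc.filter p) (l.filter p) := by
    intro l
    induction l with
    | nil => simp
    | cons x xs ih =>
      intro acc
      simp only [List.foldl_cons, List.filter_cons]
      by_cases hx : p x
      · simp only [hx, if_pos, List.foldl_cons]
        rw [ih]
        congr 1
        simp only [PySem.Set.add]
        by_cases hmem : x ∈ acc
        · simp [hmem, List.mem_filter, hx]
        · simp [hmem, List.mem_filter, hx, List.filter_append]
      · simp only [hx, Bool.false_eq_true, if_neg, not_false_iff]
        rw [ih]
        congr 1
        simp only [PySem.Set.add]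
        split
        · rfl
        · simp [List.filter_append, hx]
  have h2 := (H l []).symm
  simp only [List.filter_nil] at h2
  exact h2

lemma pv_digitChar_mem (n : Nat) (h : n < 10) : n.digitChar ∈ pvDIG := by
  interval_cases n <;> decide

lemma pv_toDigitsCore_digits :
    ∀ (f n : Nat) (acc : List Char), (∀ c ∈ acc, c ∈ pvDIG) →
      ∀ c ∈ Nat.toDigitsCore 10 f n acc, c ∈ pvDIG := by
  intro f
  induction f with
  | zero => intro n acc hacc c hc; exact hacc c hc
  | succ f ih =>
    intro n acc hacc c hc
    rw [Nat.toDigitsCore] at hc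
    by_cases h0 : n / 10 = 0
    · simp only [h0, if_pos] at hc
      rcases List.mem_cons.mp hc with h | h
      · exact h ▸ pv_digitChar_mem _ (Nat.mod_lt _ (by norm_num))
      · exact hacc c h
    · simp only [h0, if_neg, not_false_iff] at hc
      exact ih (n / 10) _ (by
        intro c' hc'
        rcases List.mem_cons.mp hc' with h | h
        · exact h ▸ pv_digitChar_mem _ (Nat.mod_lt _ (by norm_num))
        · exact hacc c' h) c hc

lemma pv_toChars_digits (n : Int) (h : 0 ≤ n) : ∀ c ∈ PySem.Int.toChars n, c ∈ pvDIG := by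
  intro c hc
  rw [PySem.Int.toChars, if_neg (by omega)] at hc
  exact pv_toDigitsCore_digits _ _ [] (by simp) c hc

lemma pv_key_inj {c c' : Char} (hc : c ∈ pvDIG) (hc' : c' ∈ pvDIG) :
    pvKey c = pvKey c' → c = c' := by
  fin_cases hc <;> fin_cases hc' <;> decide

lemma pv_filter_key (l : List (Char × Nat)) (hl : ∀ p ∈ l, p.1 ∈ pvDIG) (c : Char) (hc : c ∈ pvDIG) :
    (l.map pvToKV).filter (fun p => p.1 == pvKey c) = (l.filter (fun p => p.1 == c)).map pvToKV := by
  rw [List.filter_map]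
  congr 1
  apply List.filter_congr
  intro p hp
  by_cases h : p.1 = c
  · simp [pvToKV, Function.comp, h]
  · have hne : pvKey p.1 ≠ pvKey c := fun he => h (pv_key_inj (hl p hp) hc he)
    simp [pvToKV, Function.comp, h, hne]

lemma pv_pos_len (s : List Char) (c : Char) :
    (s.zipIdx.filter (fun p => p.1 == c)).length = s.count c := by
  rw [← List.countP_eq_length_filter]
  rw [show (fun (p : Char × Nat) => p.1 == c) = ((fun x => x == c) ∘ Prod.fst) from rfl,
      ← List.countP_map, List.zipIdx_map_fst]
  rfl

lemma pv_fold_kv (l : List (Char × Nat)) :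
    l.foldl (fun d p => d.modify (pvKey p.1) [] (fun v => v ++ [(p.2 : Int)])) PySem.Dict.empty
      = pvDictOf (l.map pvToKV) := by
  unfold pvDictOf
  rw [List.foldl_map]
  simp only [pvToKV]

lemma pv_main (n : Int) (h : 0 ≤ n) : Repetitions n = Repetitions_alt n := by
  have hdig := pv_toChars_digits n h
  simp only [Repetitions, Repetitions_alt]
  set s := PySem.Int.toChars n with hs
  -- A's first loop = fold over enumerate
  have eA := pv_range_enum s ' '
      (fun acc i c => acc.modify (pvKey c) [] (fun v => v ++ [i])) 0 PySem.Dict.empty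
  simp only [Nat.cast_zero, List.drop_zero] at eA
  rw [eA, pv_fold_kv]
  -- B: counts is Counter(s)
  have hcnt : (s.foldl (fun d c => d.insert c (d.getD c 0 + 1)) PySem.Dict.empty)
      = PySem.Dict.counter s := PySem.Dict.foldl_insert_getD_add_one_eq_counter s
  rw [hcnt]
  have hB : s.zipIdx.foldl (fun r p => if (PySem.Dict.counter s).getD p.1 0 > 1 then r.modify (pvKey p.1) [] (fun v => v ++ [(p.2 : Int)]) else r) PySem.Dict.empty
      = pvDictOf ((s.zipIdx.filter (fun p => decide (1 < (s.count p.1 : Int)))).map pvToKV) := by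
    have h1 : (fun (r : PySem.Dict Int (List Int)) (p : Char × Nat) => if (PySem.Dict.counter s).getD p.1 0 > 1 then r.modify (pvKey p.1) [] (fun v => v ++ [(p.2 : Int)]) else r)
        = (fun r p => if (fun (q : Char × Nat) => decide (1 < (s.count q.1 : Int))) p = true then r.modify (pvKey p.1) [] (fun v => v ++ [(p.2 : Int)]) else r) := by
      funext r p
      simp [PySem.Dict.getD_counter]
    rw [h1, ← List.foldl_filter, pv_fold_kv]
  rw [hB]
  rw [pv_filter_loop _ (pv_nodup_keys_dictOf _), pv_items_dictOf]
  simp only [pv_keys_dictOf, pv_getD_dictOf]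
  have hdigz : ∀ p ∈ s.zipIdx, (p : Char × Nat).1 ∈ pvDIG := by
    intro p hp
    exact hdig p.1 (List.zipIdx_map_fst 0 s ▸ List.mem_map_of_mem hp)
  have hfst : ∀ (l : List (Char × Nat)),
      (l.map pvToKV).map (fun p => p.1) = (l.map Prod.fst).map pvKey := by
    intro l
    simp [pvToKV, List.map_map, Function.comp]
  -- key lists on both sides
  have hkeyA : (List.map pvToKV s.zipIdx).map (fun p => p.1) = s.map pvKey := by
    rw [hfst, List.zipIdx_map_fst]
  have hfilt : List.map Prod.fst (List.filter (fun p => decide (1 < ((s.count p.1 : Int)))) s.zipIdx)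
      = s.filter (fun c => decide (1 < ((s.count c : Int)))) := by
    rw [show (fun (p : Char × Nat) => decide (1 < ((s.count p.1 : Int))))
          = ((fun c => decide (1 < ((s.count c : Int)))) ∘ Prod.fst) from rfl,
        ← List.filter_map, List.zipIdx_map_fst]
  have hkeyB : (List.map pvToKV (List.filter (fun p => decide (1 < ((s.count p.1 : Int)))) s.zipIdx)).map (fun p => p.1)
      = (s.filter (fun c => decide (1 < ((s.count c : Int))))).map pvKey := by
    rw [hfst, hfilt]
  rw [hkeyA, hkeyB]
  -- A's key predicate (final list length > 1) is B's count condition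
  have hval : ∀ c ∈ s,
      (List.filter (fun p => p.1 == pvKey c) (List.map pvToKV s.zipIdx))
        = (s.zipIdx.filter (fun p => p.1 == c)).map pvToKV :=
    fun c hc => pv_filter_key _ hdigz c (hdig c hc)
  have hPA : ∀ c ∈ s,
      (decide (((List.filter (fun p => p.1 == pvKey c) (List.map pvToKV s.zipIdx)).map (fun p => p.2)).length > 1))
        = decide (1 < ((s.count c : Int))) := by
    intro c hc
    rw [hval c hc]
    simp only [List.length_map, pv_pos_len]
    simp
  have hkeys : (List.filter (fun k => decide ((List.map (fun p => p.2) (List.filter (fun p => p.1 == k) (List.map pvToKV s.zipIdx))).length > 1)) (PySem.Set.ofList (s.map pvKey)))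
      = PySem.Set.ofList ((s.filter (fun c => decide (1 < ((s.count c : Int))))).map pvKey) := by
    rw [← pv_ofList_filter]
    congr 1
    rw [List.filter_map]
    congr 1
    apply List.filter_congr
    intro c hc
    exact hPA c hc
  rw [hkeys]
  -- pointwise equality of the position lists on the common key list
  apply List.map_congr_left
  intro k hk
  rw [PySem.Set.mem_ofList] at hk
  obtain ⟨c, hcf, rfl⟩ := List.mem_map.mp hk
  have hc : c ∈ s := List.mem_of_mem_filter hcf
  have hq : decide (1 < ((s.count c : Int))) = true := (List.mem_filter.mp hcf).2
  have hdigz' : ∀ p ∈ (s.zipIdx.filter (fun p => decide (1 < ((s.count p.1 : Int))))), (p : Char × Nat).1 ∈ pvDIG :=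
    fun p hp => hdigz p (List.mem_of_mem_filter hp)
  rw [hval c hc, pv_filter_key _ hdigz' c (hdig c hc)]
  rw [List.filter_filter]
  have hpred : (fun (p : Char × Nat) => p.1 == c && decide (1 < ((s.count p.1 : Int)))) = (fun p => p.1 == c) := by
    funext p
    by_cases hpc : p.1 = c
    · have hq' : 1 < s.count c := by exact_mod_cast of_decide_eq_true hq
      simp [hpc, hq']
    · simp [hpc]
  rw [hpred]

-- ===== VERDICT (by name: the statement is the Claim_ definition above) =====
theorem Repetitions_spec : Claim_equal_Repetitions := by
  intro n _ hpre
  exact pv_main n hpre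

def Repetitions_raises : Claim_raises_Repetitions := by
  unfold Claim_raises_Repetitions
  refine ⟨fun n _ hr hp => ?_, by decide⟩
  exact absurd hp (by unfold Pre_Repetitions Raises_Repetitions at *; omega)
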